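-- pv_equiv track=rewrite | github.com/MathiasPaulenko/TalosBDD2.0 | arc/integrations/jira.py | _format_scenario_step
-- ===== SOURCE A (Python) =====
-- def _format_scenario_step(data):
--     steps = "\n".join(str(x) for x in data)
--     steps = steps \
--         .replace('given', '--- {color:purple}*Given*{color}') \
--         .replace('when', '--- {color:orange}*When*{color}') \
--         .replace('then', '--- {color:violet}*Then*{color}') \
--         .replace('\"', "")
--     return steps
-- ===== SOURCE B (Python) =====
-- def _format_scenario_step(data):
--     steps = "\n".join(str(x) for x in data)
--     table = (('given', '--- {color:purple}*Given*{color}'),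
--              ('when', '--- {color:orange}*When*{color}'),
--              ('then', '--- {color:violet}*Then*{color}'),
--              ('"', ''))
--     out = []
--     i = 0
--     n = len(steps)
--     while i < n:
--         for tok, rep in table:
--             if steps.startswith(tok, i):
--                 out.append(rep)
--                 i += len(tok)
--                 break
--         else:
--             out.append(steps[i])
--             i += 1
--     return ''.join(out)
-- ===== Notes on version B (the rewrite author's own statement) =====
-- stated objective: alternative
-- what changed: A makes four chained full-string str.replace passes; B does a single left-to-right scan with a token->replacement table, emitting each replacement (or the unchanged character) in one pass.
import Mathlib
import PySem

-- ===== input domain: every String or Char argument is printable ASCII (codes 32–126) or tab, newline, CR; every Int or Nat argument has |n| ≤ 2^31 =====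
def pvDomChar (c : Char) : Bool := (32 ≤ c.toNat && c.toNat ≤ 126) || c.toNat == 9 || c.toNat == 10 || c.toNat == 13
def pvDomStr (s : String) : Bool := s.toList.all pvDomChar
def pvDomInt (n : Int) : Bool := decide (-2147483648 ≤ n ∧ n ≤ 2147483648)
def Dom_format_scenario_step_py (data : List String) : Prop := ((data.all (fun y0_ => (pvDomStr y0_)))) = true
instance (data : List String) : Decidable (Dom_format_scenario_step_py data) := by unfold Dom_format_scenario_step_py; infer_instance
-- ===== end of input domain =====

-- B replaces A's four chained full-string .replace passes by a single left-to-right scan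
-- driven by a token table (objective: alternative; same asymptotic cost).

-- ===== PORT A =====
-- A: join with "\n" (str(x) on a str is the identity), then four chained str.replace passes.
def format_scenario_step_py (data : List String) : String :=
  let steps := PySem.Str.join "\n" (data.map (fun x => x))
  PySem.Str.replace
    (PySem.Str.replace
      (PySem.Str.replace
        (PySem.Str.replace steps "given" "--- {color:purple}*Given*{color}")
        "when" "--- {color:orange}*When*{color}")
      "then" "--- {color:violet}*Then*{color}")
    "\"" ""

-- ===== PORT B =====
-- B's while-loop over positions becomes structural recursion on the char list; the inner
-- `for tok, rep in table` over the 4-entry literal table is unrolled into the four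
-- startswith tests in table order; `out.append`/''.join(out) becomes list append/cons.
def pvScan (s : List Char) : List Char :=
  match s with
  | [] => []
  | c :: t =>
    if ("given".toList).isPrefixOf (c :: t) then
      "--- {color:purple}*Given*{color}".toList ++ pvScan ((c :: t).drop 5)
    else if ("when".toList).isPrefixOf (c :: t) then
      "--- {color:orange}*When*{color}".toList ++ pvScan ((c :: t).drop 4)
    else if ("then".toList).isPrefixOf (c :: t) then
      "--- {color:violet}*Then*{color}".toList ++ pvScan ((c :: t).drop 4)
    else if c = '"' then pvScan t
    else c :: pvScan t
termination_by s.length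
decreasing_by all_goals simp

def format_scenario_step_py_alt (data : List String) : String :=
  let steps := PySem.Str.join "\n" (data.map (fun x => x))
  String.ofList (pvScan steps.toList)

-- ===== PRECONDITION & SPEC =====
def Spec_format_scenario_step_py (data : List String) (out : String) : Prop := out = format_scenario_step_py_alt data
instance (data : List String) (out : String) : Decidable (Spec_format_scenario_step_py data out) := by unfold Spec_format_scenario_step_py; infer_instance

-- ===== CLAIM (what is proved, stated in full; the proofs are below) =====
def Claim_equal_format_scenario_step_py : Prop := ∀ (data : List String), Dom_format_scenario_step_py data → Spec_format_scenario_step_py data (format_scenario_step_py data)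

-- ===== LEMMAS AND PROOFS =====
set_option maxRecDepth 2000

-- Python str.replace (for a nonempty pattern) as plain structural recursion.
def pvRep (old new s : List Char) : List Char :=
  match old, s with
  | _, [] => []
  | [], c :: t => c :: pvRep [] new t
  | a :: o, c :: t =>
    if (a :: o).isPrefixOf (c :: t) then new ++ pvRep (a :: o) new ((c :: t).drop (a :: o).length)
    else c :: pvRep (a :: o) new t
termination_by s.length
decreasing_by all_goals simp

theorem pvRep_go (a : Char) (o new : List Char) :
    ∀ fuel l acc, l.length ≤ fuel →
      PySem.Chars.replace.go (a :: o) new fuel l acc = acc.reverse ++ pvRep (a :: o) new l := by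
  intro fuel
  induction fuel with
  | zero =>
    intro l acc h
    have hl : l = [] := List.eq_nil_of_length_eq_zero (Nat.le_zero.mp h)
    subst hl
    simp [PySem.Chars.replace.go, pvRep]
  | succ n ih =>
    intro l acc h
    cases l with
    | nil => simp [PySem.Chars.replace.go, pvRep]
    | cons c t =>
      rw [PySem.Chars.replace.go]
      simp only [pvRep]
      by_cases hp : (a :: o).isPrefixOf (c :: t) = true
      · rw [if_pos hp, if_pos hp, ih _ _ (by simp at h ⊢; omega)]
        simp
      · rw [if_neg hp, if_neg hp, ih _ _ (by simp at h ⊢; omega)]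
        simp

theorem replace_eq_pvRep (old new s : List Char) (h : old ≠ []) :
    PySem.Chars.replace s old new = pvRep old new s := by
  obtain ⟨a, o, rfl⟩ := List.exists_cons_of_ne_nil h
  rw [PySem.Chars.replace]
  rw [if_neg (by simp), pvRep_go a o new s.length s [] le_rfl]
  simp

-- p is transparent to pvRep (a::o) (nh::nt) as long as no char of p can start the
-- pattern or its replacement.
theorem prefix_pvRep (a nh : Char) (o nt : List Char) :
    ∀ fuel s p, s.length ≤ fuel → (∀ c ∈ p, c ≠ a ∧ c ≠ nh) →
      (p <+: pvRep (a :: o) (nh :: nt) s ↔ p <+: s) := by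
  intro fuel
  induction fuel with
  | zero =>
    intro s p h _
    have hs : s = [] := List.eq_nil_of_length_eq_zero (Nat.le_zero.mp h)
    subst hs
    simp [pvRep]
  | succ n ih =>
    intro s p h hp
    cases s with
    | nil => simp [pvRep]
    | cons c t =>
      simp only [pvRep]
      by_cases hpre : (a :: o).isPrefixOf (c :: t) = true
      · rw [if_pos hpre]
        cases p with
        | nil => simp
        | cons q ps =>
          constructor
          · intro hq
            exfalso
            have hq' : q :: ps <+: nh :: (nt ++ pvRep (a :: o) (nh :: nt) ((c :: t).drop (a :: o).length)) := by
              simpa using hq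
            exact (hp q (by simp)).2 (List.cons_prefix_cons.mp hq').1
          · intro hq
            exfalso
            have hc : a = c := (List.cons_prefix_cons.mp (List.isPrefixOf_iff_prefix.mp hpre)).1
            exact (hp q (by simp)).1 ((List.cons_prefix_cons.mp hq).1.trans hc.symm)
      · rw [if_neg hpre]
        cases p with
        | nil => simp
        | cons q ps =>
          rw [List.cons_prefix_cons, List.cons_prefix_cons,
            ih t ps (by simp at h; omega) (fun c hc => hp c (by simp [hc]))]

-- pvRep passes over a block `pre` none of whose suffixes can start or be started by the pattern.
theorem pvRep_append (old new : List Char) :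
    ∀ pre b, (∀ i < pre.length, old.isPrefixOf (pre.drop i) = false ∧ (pre.drop i).isPrefixOf old = false) →
      pvRep old new (pre ++ b) = pre ++ pvRep old new b := by
  intro pre
  induction pre with
  | nil => intro b _; simp
  | cons c t ih =>
    intro b h
    have h0 := h 0 (by simp)
    simp only [List.drop_zero] at h0
    have h01 : ¬ old <+: (c :: t) := fun hp => by
      rw [← List.isPrefixOf_iff_prefix] at hp
      simp [hp] at h0
    have h02 : ¬ (c :: t) <+: old := fun hp => by
      rw [← List.isPrefixOf_iff_prefix] at hp
      simp [hp] at h0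
    obtain ⟨a, o, rfl⟩ : ∃ a o, old = a :: o := by
      cases old with
      | nil => exact absurd (List.nil_prefix (l := c :: t)) h01
      | cons a o => exact ⟨a, o, rfl⟩
    rw [List.cons_append]
    simp only [pvRep]
    have hnp : ¬ (a :: o).isPrefixOf (c :: (t ++ b)) = true := by
      intro hyes
      rcases List.prefix_or_prefix_of_prefix (List.isPrefixOf_iff_prefix.mp hyes)
        (List.prefix_append (c :: t) b) with hcase | hcase
      · exact h01 hcase
      · exact h02 hcase
    rw [if_neg hnp]
    rw [ih b (fun i hi => by simpa using h (i + 1) (by simpa using Nat.succ_lt_succ hi))]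
    simp


-- String-literal ↔ char-list bridges (all rfl).
theorem litG : "given".toList = ['g', 'i', 'v', 'e', 'n'] := rfl
theorem litW : "when".toList = ['w', 'h', 'e', 'n'] := rfl
theorem litT : "then".toList = ['t', 'h', 'e', 'n'] := rfl
theorem litQ : "\"".toList = ['"'] := rfl
theorem litE : "".toList = ([] : List Char) := rfl
theorem litRG : "--- {color:purple}*Given*{color}".toList = ['-', '-', '-', ' ', '{', 'c', 'o', 'l', 'o', 'r', ':', 'p', 'u', 'r', 'p', 'l', 'e', '}', '*', 'G', 'i', 'v', 'e', 'n', '*', '{', 'c', 'o', 'l', 'o', 'r', '}'] := rfl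
theorem litRW : "--- {color:orange}*When*{color}".toList = ['-', '-', '-', ' ', '{', 'c', 'o', 'l', 'o', 'r', ':', 'o', 'r', 'a', 'n', 'g', 'e', '}', '*', 'W', 'h', 'e', 'n', '*', '{', 'c', 'o', 'l', 'o', 'r', '}'] := rfl
theorem litRT : "--- {color:violet}*Then*{color}".toList = ['-', '-', '-', ' ', '{', 'c', 'o', 'l', 'o', 'r', ':', 'v', 'i', 'o', 'l', 'e', 't', '}', '*', 'T', 'h', 'e', 'n', '*', '{', 'c', 'o', 'l', 'o', 'r', '}'] := rfl

-- Certificates: no suffix of a replacement block starts, or is started by, a later token.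
theorem certRG_W : ∀ i < (['-', '-', '-', ' ', '{', 'c', 'o', 'l', 'o', 'r', ':', 'p', 'u', 'r', 'p', 'l', 'e', '}', '*', 'G', 'i', 'v', 'e', 'n', '*', '{', 'c', 'o', 'l', 'o', 'r', '}'] : List Char).length,
    (['w', 'h', 'e', 'n'] : List Char).isPrefixOf ((['-', '-', '-', ' ', '{', 'c', 'o', 'l', 'o', 'r', ':', 'p', 'u', 'r', 'p', 'l', 'e', '}', '*', 'G', 'i', 'v', 'e', 'n', '*', '{', 'c', 'o', 'l', 'o', 'r', '}'] : List Char).drop i) = false ∧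
    ((['-', '-', '-', ' ', '{', 'c', 'o', 'l', 'o', 'r', ':', 'p', 'u', 'r', 'p', 'l', 'e', '}', '*', 'G', 'i', 'v', 'e', 'n', '*', '{', 'c', 'o', 'l', 'o', 'r', '}'] : List Char).drop i).isPrefixOf (['w', 'h', 'e', 'n'] : List Char) = false := by decide
theorem certRG_T : ∀ i < (['-', '-', '-', ' ', '{', 'c', 'o', 'l', 'o', 'r', ':', 'p', 'u', 'r', 'p', 'l', 'e', '}', '*', 'G', 'i', 'v', 'e', 'n', '*', '{', 'c', 'o', 'l', 'o', 'r', '}'] : List Char).length,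
    (['t', 'h', 'e', 'n'] : List Char).isPrefixOf ((['-', '-', '-', ' ', '{', 'c', 'o', 'l', 'o', 'r', ':', 'p', 'u', 'r', 'p', 'l', 'e', '}', '*', 'G', 'i', 'v', 'e', 'n', '*', '{', 'c', 'o', 'l', 'o', 'r', '}'] : List Char).drop i) = false ∧
    ((['-', '-', '-', ' ', '{', 'c', 'o', 'l', 'o', 'r', ':', 'p', 'u', 'r', 'p', 'l', 'e', '}', '*', 'G', 'i', 'v', 'e', 'n', '*', '{', 'c', 'o', 'l', 'o', 'r', '}'] : List Char).drop i).isPrefixOf (['t', 'h', 'e', 'n'] : List Char) = false := by decide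
theorem certRG_Q : ∀ i < (['-', '-', '-', ' ', '{', 'c', 'o', 'l', 'o', 'r', ':', 'p', 'u', 'r', 'p', 'l', 'e', '}', '*', 'G', 'i', 'v', 'e', 'n', '*', '{', 'c', 'o', 'l', 'o', 'r', '}'] : List Char).length,
    (['"'] : List Char).isPrefixOf ((['-', '-', '-', ' ', '{', 'c', 'o', 'l', 'o', 'r', ':', 'p', 'u', 'r', 'p', 'l', 'e', '}', '*', 'G', 'i', 'v', 'e', 'n', '*', '{', 'c', 'o', 'l', 'o', 'r', '}'] : List Char).drop i) = false ∧
    ((['-', '-', '-', ' ', '{', 'c', 'o', 'l', 'o', 'r', ':', 'p', 'u', 'r', 'p', 'l', 'e', '}', '*', 'G', 'i', 'v', 'e', 'n', '*', '{', 'c', 'o', 'l', 'o', 'r', '}'] : List Char).drop i).isPrefixOf (['"'] : List Char) = false := by decide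
theorem certRW_T : ∀ i < (['-', '-', '-', ' ', '{', 'c', 'o', 'l', 'o', 'r', ':', 'o', 'r', 'a', 'n', 'g', 'e', '}', '*', 'W', 'h', 'e', 'n', '*', '{', 'c', 'o', 'l', 'o', 'r', '}'] : List Char).length,
    (['t', 'h', 'e', 'n'] : List Char).isPrefixOf ((['-', '-', '-', ' ', '{', 'c', 'o', 'l', 'o', 'r', ':', 'o', 'r', 'a', 'n', 'g', 'e', '}', '*', 'W', 'h', 'e', 'n', '*', '{', 'c', 'o', 'l', 'o', 'r', '}'] : List Char).drop i) = false ∧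
    ((['-', '-', '-', ' ', '{', 'c', 'o', 'l', 'o', 'r', ':', 'o', 'r', 'a', 'n', 'g', 'e', '}', '*', 'W', 'h', 'e', 'n', '*', '{', 'c', 'o', 'l', 'o', 'r', '}'] : List Char).drop i).isPrefixOf (['t', 'h', 'e', 'n'] : List Char) = false := by decide
theorem certRW_Q : ∀ i < (['-', '-', '-', ' ', '{', 'c', 'o', 'l', 'o', 'r', ':', 'o', 'r', 'a', 'n', 'g', 'e', '}', '*', 'W', 'h', 'e', 'n', '*', '{', 'c', 'o', 'l', 'o', 'r', '}'] : List Char).length,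
    (['"'] : List Char).isPrefixOf ((['-', '-', '-', ' ', '{', 'c', 'o', 'l', 'o', 'r', ':', 'o', 'r', 'a', 'n', 'g', 'e', '}', '*', 'W', 'h', 'e', 'n', '*', '{', 'c', 'o', 'l', 'o', 'r', '}'] : List Char).drop i) = false ∧
    ((['-', '-', '-', ' ', '{', 'c', 'o', 'l', 'o', 'r', ':', 'o', 'r', 'a', 'n', 'g', 'e', '}', '*', 'W', 'h', 'e', 'n', '*', '{', 'c', 'o', 'l', 'o', 'r', '}'] : List Char).drop i).isPrefixOf (['"'] : List Char) = false := by decide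
theorem certRT_Q : ∀ i < (['-', '-', '-', ' ', '{', 'c', 'o', 'l', 'o', 'r', ':', 'v', 'i', 'o', 'l', 'e', 't', '}', '*', 'T', 'h', 'e', 'n', '*', '{', 'c', 'o', 'l', 'o', 'r', '}'] : List Char).length,
    (['"'] : List Char).isPrefixOf ((['-', '-', '-', ' ', '{', 'c', 'o', 'l', 'o', 'r', ':', 'v', 'i', 'o', 'l', 'e', 't', '}', '*', 'T', 'h', 'e', 'n', '*', '{', 'c', 'o', 'l', 'o', 'r', '}'] : List Char).drop i) = false ∧
    ((['-', '-', '-', ' ', '{', 'c', 'o', 'l', 'o', 'r', ':', 'v', 'i', 'o', 'l', 'e', 't', '}', '*', 'T', 'h', 'e', 'n', '*', '{', 'c', 'o', 'l', 'o', 'r', '}'] : List Char).drop i).isPrefixOf (['"'] : List Char) = false := by decide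

theorem chain_eq_scan :
    ∀ fuel s, s.length ≤ fuel →
      pvRep "\"".toList "".toList (pvRep "then".toList "--- {color:violet}*Then*{color}".toList
        (pvRep "when".toList "--- {color:orange}*When*{color}".toList
          (pvRep "given".toList "--- {color:purple}*Given*{color}".toList s))) = pvScan s := by
  intro fuel
  induction fuel with
  | zero =>
    intro s h
    have hs : s = [] := List.eq_nil_of_length_eq_zero (Nat.le_zero.mp h)
    subst hs
    simp [pvRep, pvScan]
  | succ n ih =>
    intro s h
    simp only [litG, litW, litT, litQ, litE, litRG, litRW, litRT]
    cases s with
    | nil => simp [pvRep, pvScan]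
    | cons c t =>
      by_cases hG : (['g', 'i', 'v', 'e', 'n'] : List Char).isPrefixOf (c :: t) = true
      · -- the scan and the first replace both consume 'given' here
        obtain ⟨r, hr⟩ := List.isPrefixOf_iff_prefix.mp hG
        have hrlen : r.length ≤ n := by
          have h5 := congrArg List.length hr
          simp at h5 h
          omega
        rw [← hr]
        have e1 : pvRep ['g', 'i', 'v', 'e', 'n'] ['-', '-', '-', ' ', '{', 'c', 'o', 'l', 'o', 'r', ':', 'p', 'u', 'r', 'p', 'l', 'e', '}', '*', 'G', 'i', 'v', 'e', 'n', '*', '{', 'c', 'o', 'l', 'o', 'r', '}'] (['g', 'i', 'v', 'e', 'n'] ++ r) = ['-', '-', '-', ' ', '{', 'c', 'o', 'l', 'o', 'r', ':', 'p', 'u', 'r', 'p', 'l', 'e', '}', '*', 'G', 'i', 'v', 'e', 'n', '*', '{', 'c', 'o', 'l', 'o', 'r', '}'] ++ pvRep ['g', 'i', 'v', 'e', 'n'] ['-', '-', '-', ' ', '{', 'c', 'o', 'l', 'o', 'r', ':', 'p', 'u', 'r', 'p', 'l', 'e', '}', '*', 'G', 'i', 'v', 'e', 'n', '*', '{', 'c',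 'o', 'l', 'o', 'r', '}'] r := by
          simp [pvRep, List.isPrefixOf]
        rw [e1,
          pvRep_append ['w', 'h', 'e', 'n'] ['-', '-', '-', ' ', '{', 'c', 'o', 'l', 'o', 'r', ':', 'o', 'r', 'a', 'n', 'g', 'e', '}', '*', 'W', 'h', 'e', 'n', '*', '{', 'c', 'o', 'l', 'o', 'r', '}'] ['-', '-', '-', ' ', '{', 'c', 'o', 'l', 'o', 'r', ':', 'p', 'u', 'r', 'p', 'l', 'e', '}', '*', 'G', 'i', 'v', 'e', 'n', '*', '{', 'c', 'o', 'l', 'o', 'r', '}'] _ certRG_W,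
          pvRep_append ['t', 'h', 'e', 'n'] ['-', '-', '-', ' ', '{', 'c', 'o', 'l', 'o', 'r', ':', 'v', 'i', 'o', 'l', 'e', 't', '}', '*', 'T', 'h', 'e', 'n', '*', '{', 'c', 'o', 'l', 'o', 'r', '}'] ['-', '-', '-', ' ', '{', 'c', 'o', 'l', 'o', 'r', ':', 'p', 'u', 'r', 'p', 'l', 'e', '}', '*', 'G', 'i', 'v', 'e', 'n', '*', '{', 'c', 'o', 'l', 'o', 'r', '}'] _ certRG_T,
          pvRep_append ['"'] [] ['-', '-', '-', ' ', '{', 'c', 'o', 'l', 'o', 'r', ':', 'p', 'u', 'r', 'p', 'l', 'e', '}', '*', 'G', 'i', 'v', 'e', 'n', '*', '{', 'c', 'o', 'l', 'o', 'r', '}'] _ certRG_Q]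
        have ih' := ih r hrlen
        simp only [litG, litW, litT, litQ, litE, litRG, litRW, litRT] at ih'
        rw [ih']
        have e5 : pvScan (['g', 'i', 'v', 'e', 'n'] ++ r) = ['-', '-', '-', ' ', '{', 'c', 'o', 'l', 'o', 'r', ':', 'p', 'u', 'r', 'p', 'l', 'e', '}', '*', 'G', 'i', 'v', 'e', 'n', '*', '{', 'c', 'o', 'l', 'o', 'r', '}'] ++ pvScan r := by
          simp [pvScan, List.isPrefixOf, litG, litRG]
        rw [e5]
      · by_cases hW : (['w', 'h', 'e', 'n'] : List Char).isPrefixOf (c :: t) = true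
        · obtain ⟨r, hr⟩ := List.isPrefixOf_iff_prefix.mp hW
          have hrlen : r.length ≤ n := by
            have h4 := congrArg List.length hr
            simp at h4 h
            omega
          rw [← hr]
          have e1 : pvRep ['g', 'i', 'v', 'e', 'n'] ['-', '-', '-', ' ', '{', 'c', 'o', 'l', 'o', 'r', ':', 'p', 'u', 'r', 'p', 'l', 'e', '}', '*', 'G', 'i', 'v', 'e', 'n', '*', '{', 'c', 'o', 'l', 'o', 'r', '}'] (['w', 'h', 'e', 'n'] ++ r) = ['w', 'h', 'e', 'n'] ++ pvRep ['g', 'i', 'v', 'e', 'n'] ['-', '-', '-', ' ', '{', 'c', 'o', 'l', 'o', 'r', ':', 'p', 'u', 'r', 'p', 'l', 'e', '}', '*', 'G', 'i', 'v', 'e', 'n', '*', '{', 'c', 'o', 'l', 'o', 'r', '}'] r := by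
            simp [pvRep, List.isPrefixOf]
          have e2 : pvRep ['w', 'h', 'e', 'n'] ['-', '-', '-', ' ', '{', 'c', 'o', 'l', 'o', 'r', ':', 'o', 'r', 'a', 'n', 'g', 'e', '}', '*', 'W', 'h', 'e', 'n', '*', '{', 'c', 'o', 'l', 'o', 'r', '}'] (['w', 'h', 'e', 'n'] ++ pvRep ['g', 'i', 'v', 'e', 'n'] ['-', '-', '-', ' ', '{', 'c', 'o', 'l', 'o', 'r', ':', 'p', 'u', 'r', 'p', 'l', 'e', '}', '*', 'G', 'i', 'v', 'e', 'n', '*', '{', 'c', 'o', 'l', 'o', 'r', '}'] r)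
              = ['-', '-', '-', ' ', '{', 'c', 'o', 'l', 'o', 'r', ':', 'o', 'r', 'a', 'n', 'g', 'e', '}', '*', 'W', 'h', 'e', 'n', '*', '{', 'c', 'o', 'l', 'o', 'r', '}'] ++ pvRep ['w', 'h', 'e', 'n'] ['-', '-', '-', ' ', '{', 'c', 'o', 'l', 'o', 'r', ':', 'o', 'r', 'a', 'n', 'g', 'e', '}', '*', 'W', 'h', 'e', 'n', '*', '{', 'c', 'o', 'l', 'o', 'r', '}'] (pvRep ['g', 'i', 'v', 'e', 'n'] ['-', '-', '-', ' ', '{', 'c', 'o', 'l', 'o', 'r', ':', 'p', 'u', 'r', 'p', 'l', 'e', '}', '*', 'G', 'i', 'v', 'e', 'n', '*', '{', 'c', 'o', 'l', 'o', 'r', '}'] r) := by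
            simp [pvRep, List.isPrefixOf]
          rw [e1, e2,
            pvRep_append ['t', 'h', 'e', 'n'] ['-', '-', '-', ' ', '{', 'c', 'o', 'l', 'o', 'r', ':', 'v', 'i', 'o', 'l', 'e', 't', '}', '*', 'T', 'h', 'e', 'n', '*', '{', 'c', 'o', 'l', 'o', 'r', '}'] ['-', '-', '-', ' ', '{', 'c', 'o', 'l', 'o', 'r', ':', 'o', 'r', 'a', 'n', 'g', 'e', '}', '*', 'W', 'h', 'e', 'n', '*', '{', 'c', 'o', 'l', 'o', 'r', '}'] _ certRW_T,
            pvRep_append ['"'] [] ['-', '-', '-', ' ', '{', 'c', 'o', 'l', 'o', 'r', ':', 'o', 'r', 'a', 'n', 'g', 'e', '}', '*', 'W', 'h', 'e', 'n', '*', '{', 'c', 'o', 'l', 'o', 'r', '}'] _ certRW_Q]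
          have ih' := ih r hrlen
          simp only [litG, litW, litT, litQ, litE, litRG, litRW, litRT] at ih'
          rw [ih']
          have e5 : pvScan (['w', 'h', 'e', 'n'] ++ r) = ['-', '-', '-', ' ', '{', 'c', 'o', 'l', 'o', 'r', ':', 'o', 'r', 'a', 'n', 'g', 'e', '}', '*', 'W', 'h', 'e', 'n', '*', '{', 'c', 'o', 'l', 'o', 'r', '}'] ++ pvScan r := by
            simp [pvScan, List.isPrefixOf, litG, litW, litRW]
          rw [e5]
        · by_cases hT : (['t', 'h', 'e', 'n'] : List Char).isPrefixOf (c :: t) = true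
          · obtain ⟨r, hr⟩ := List.isPrefixOf_iff_prefix.mp hT
            have hrlen : r.length ≤ n := by
              have h4 := congrArg List.length hr
              simp at h4 h
              omega
            rw [← hr]
            have e1 : pvRep ['g', 'i', 'v', 'e', 'n'] ['-', '-', '-', ' ', '{', 'c', 'o', 'l', 'o', 'r', ':', 'p', 'u', 'r', 'p', 'l', 'e', '}', '*', 'G', 'i', 'v', 'e', 'n', '*', '{', 'c', 'o', 'l', 'o', 'r', '}'] (['t', 'h', 'e', 'n'] ++ r) = ['t', 'h', 'e', 'n'] ++ pvRep ['g', 'i', 'v', 'e', 'n'] ['-', '-', '-', ' ', '{', 'c', 'o', 'l', 'o', 'r', ':', 'p', 'u', 'r', 'p', 'l', 'e', '}', '*', 'G', 'i', 'v', 'e', 'n', '*', '{', 'c', 'o', 'l', 'o', 'r', '}'] r := by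
              simp [pvRep, List.isPrefixOf]
            have e2 : pvRep ['w', 'h', 'e', 'n'] ['-', '-', '-', ' ', '{', 'c', 'o', 'l', 'o', 'r', ':', 'o', 'r', 'a', 'n', 'g', 'e', '}', '*', 'W', 'h', 'e', 'n', '*', '{', 'c', 'o', 'l', 'o', 'r', '}'] (['t', 'h', 'e', 'n'] ++ pvRep ['g', 'i', 'v', 'e', 'n'] ['-', '-', '-', ' ', '{', 'c', 'o', 'l', 'o', 'r', ':', 'p', 'u', 'r', 'p', 'l', 'e', '}', '*', 'G', 'i', 'v', 'e', 'n', '*', '{', 'c', 'o', 'l', 'o', 'r', '}'] r)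
                = ['t', 'h', 'e', 'n'] ++ pvRep ['w', 'h', 'e', 'n'] ['-', '-', '-', ' ', '{', 'c', 'o', 'l', 'o', 'r', ':', 'o', 'r', 'a', 'n', 'g', 'e', '}', '*', 'W', 'h', 'e', 'n', '*', '{', 'c', 'o', 'l', 'o', 'r', '}'] (pvRep ['g', 'i', 'v', 'e', 'n'] ['-', '-', '-', ' ', '{', 'c', 'o', 'l', 'o', 'r', ':', 'p', 'u', 'r', 'p', 'l', 'e', '}', '*', 'G', 'i', 'v', 'e', 'n', '*', '{', 'c', 'o', 'l', 'o', 'r', '}'] r) := by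
              simp [pvRep, List.isPrefixOf]
            have e3 : pvRep ['t', 'h', 'e', 'n'] ['-', '-', '-', ' ', '{', 'c', 'o', 'l', 'o', 'r', ':', 'v', 'i', 'o', 'l', 'e', 't', '}', '*', 'T', 'h', 'e', 'n', '*', '{', 'c', 'o', 'l', 'o', 'r', '}'] (['t', 'h', 'e', 'n'] ++ pvRep ['w', 'h', 'e', 'n'] ['-', '-', '-', ' ', '{', 'c', 'o', 'l', 'o', 'r', ':', 'o', 'r', 'a', 'n', 'g', 'e', '}', '*', 'W', 'h', 'e', 'n', '*', '{', 'c', 'o', 'l', 'o', 'r', '}'] (pvRep ['g', 'i', 'v', 'e', 'n'] ['-', '-', '-', ' ', '{', 'c', 'o', 'l', 'o', 'r', ':', 'p', 'u', 'r', 'p', 'l', 'e', '}', '*', 'G', 'i', 'v', 'e', 'n', '*', '{', 'c', 'o', 'l', 'o', 'r', '}'] r))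
                = ['-', '-', '-', ' ', '{', 'c', 'o', 'l', 'o', 'r', ':', 'v', 'i', 'o', 'l', 'e', 't', '}', '*', 'T', 'h', 'e', 'n', '*', '{', 'c', 'o', 'l', 'o', 'r', '}'] ++ pvRep ['t', 'h', 'e', 'n'] ['-', '-', '-', ' ', '{', 'c', 'o', 'l', 'o', 'r', ':', 'v', 'i', 'o', 'l', 'e', 't', '}', '*', 'T', 'h', 'e', 'n', '*', '{', 'c', 'o', 'l', 'o', 'r', '}'] (pvRep ['w', 'h', 'e', 'n'] ['-', '-', '-', ' ', '{', 'c', 'o', 'l', 'o', 'r', ':', 'o', 'r', 'a', 'n', 'g', 'e', '}', '*', 'W', 'h', 'e', 'n', '*', '{', 'c', 'o', 'l', 'o', 'r', '}'] (pvRep ['g', 'i', 'v', 'e', 'n'] ['-', '-', '-', ' ', '{', 'c', 'o', 'l', 'o', 'r', ':', 'p', 'u', 'r', 'p', 'l', 'e', '}', '*', 'G', 'i', 'v', 'e', 'n', '*', '{', 'c', 'o', 'l', 'o', 'r', '}'] r)) := by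
              simp [pvRep, List.isPrefixOf]
            rw [e1, e2, e3, pvRep_append ['"'] [] ['-', '-', '-', ' ', '{', 'c', 'o', 'l', 'o', 'r', ':', 'v', 'i', 'o', 'l', 'e', 't', '}', '*', 'T', 'h', 'e', 'n', '*', '{', 'c', 'o', 'l', 'o', 'r', '}'] _ certRT_Q]
            have ih' := ih r hrlen
            simp only [litG, litW, litT, litQ, litE, litRG, litRW, litRT] at ih'
            rw [ih']
            have e5 : pvScan (['t', 'h', 'e', 'n'] ++ r) = ['-', '-', '-', ' ', '{', 'c', 'o', 'l', 'o', 'r', ':', 'v', 'i', 'o', 'l', 'e', 't', '}', '*', 'T', 'h', 'e', 'n', '*', '{', 'c', 'o', 'l', 'o', 'r', '}'] ++ pvScan r := by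
              simp [pvScan, List.isPrefixOf, litG, litW, litT, litRT]
            rw [e5]
          · by_cases hQ : c = '"'
            · subst hQ
              have hrlen : t.length ≤ n := by simp at h; omega
              have e1 : pvRep ['g', 'i', 'v', 'e', 'n'] ['-', '-', '-', ' ', '{', 'c', 'o', 'l', 'o', 'r', ':', 'p', 'u', 'r', 'p', 'l', 'e', '}', '*', 'G', 'i', 'v', 'e', 'n', '*', '{', 'c', 'o', 'l', 'o', 'r', '}'] ('"' :: t) = '"' :: pvRep ['g', 'i', 'v', 'e', 'n'] ['-', '-', '-', ' ', '{', 'c', 'o', 'l', 'o', 'r', ':', 'p', 'u', 'r', 'p', 'l', 'e', '}', '*', 'G', 'i', 'v', 'e', 'n', '*', '{', 'c', 'o', 'l', 'o', 'r', '}'] t := by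
                simp [pvRep, List.isPrefixOf]
              have e2 : pvRep ['w', 'h', 'e', 'n'] ['-', '-', '-', ' ', '{', 'c', 'o', 'l', 'o', 'r', ':', 'o', 'r', 'a', 'n', 'g', 'e', '}', '*', 'W', 'h', 'e', 'n', '*', '{', 'c', 'o', 'l', 'o', 'r', '}'] ('"' :: pvRep ['g', 'i', 'v', 'e', 'n'] ['-', '-', '-', ' ', '{', 'c', 'o', 'l', 'o', 'r', ':', 'p', 'u', 'r', 'p', 'l', 'e', '}', '*', 'G', 'i', 'v', 'e', 'n', '*', '{', 'c', 'o', 'l', 'o', 'r', '}'] t)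
                  = '"' :: pvRep ['w', 'h', 'e', 'n'] ['-', '-', '-', ' ', '{', 'c', 'o', 'l', 'o', 'r', ':', 'o', 'r', 'a', 'n', 'g', 'e', '}', '*', 'W', 'h', 'e', 'n', '*', '{', 'c', 'o', 'l', 'o', 'r', '}'] (pvRep ['g', 'i', 'v', 'e', 'n'] ['-', '-', '-', ' ', '{', 'c', 'o', 'l', 'o', 'r', ':', 'p', 'u', 'r', 'p', 'l', 'e', '}', '*', 'G', 'i', 'v', 'e', 'n', '*', '{', 'c', 'o', 'l', 'o', 'r', '}'] t) := by
                simp [pvRep, List.isPrefixOf]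
              have e3 : pvRep ['t', 'h', 'e', 'n'] ['-', '-', '-', ' ', '{', 'c', 'o', 'l', 'o', 'r', ':', 'v', 'i', 'o', 'l', 'e', 't', '}', '*', 'T', 'h', 'e', 'n', '*', '{', 'c', 'o', 'l', 'o', 'r', '}'] ('"' :: pvRep ['w', 'h', 'e', 'n'] ['-', '-', '-', ' ', '{', 'c', 'o', 'l', 'o', 'r', ':', 'o', 'r', 'a', 'n', 'g', 'e', '}', '*', 'W', 'h', 'e', 'n', '*', '{', 'c', 'o', 'l', 'o', 'r', '}'] (pvRep ['g', 'i', 'v', 'e', 'n'] ['-', '-', '-', ' ', '{', 'c', 'o', 'l', 'o', 'r', ':', 'p', 'u', 'r', 'p', 'l', 'e', '}', '*', 'G', 'i', 'v', 'e', 'n', '*', '{', 'c', 'o', 'l', 'o', 'r', '}'] t))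
                  = '"' :: pvRep ['t', 'h', 'e', 'n'] ['-', '-', '-', ' ', '{', 'c', 'o', 'l', 'o', 'r', ':', 'v', 'i', 'o', 'l', 'e', 't', '}', '*', 'T', 'h', 'e', 'n', '*', '{', 'c', 'o', 'l', 'o', 'r', '}'] (pvRep ['w', 'h', 'e', 'n'] ['-', '-', '-', ' ', '{', 'c', 'o', 'l', 'o', 'r', ':', 'o', 'r', 'a', 'n', 'g', 'e', '}', '*', 'W', 'h', 'e', 'n', '*', '{', 'c', 'o', 'l', 'o', 'r', '}'] (pvRep ['g', 'i', 'v', 'e', 'n'] ['-', '-', '-', ' ', '{', 'c', 'o', 'l', 'o', 'r', ':', 'p', 'u', 'r', 'p', 'l', 'e', '}', '*', 'G', 'i', 'v', 'e', 'n', '*', '{', 'c', 'o', 'l', 'o', 'r', '}'] t)) := by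
                simp [pvRep, List.isPrefixOf]
              have e4 : pvRep ['"'] []
                    ('"' :: pvRep ['t', 'h', 'e', 'n'] ['-', '-', '-', ' ', '{', 'c', 'o', 'l', 'o', 'r', ':', 'v', 'i', 'o', 'l', 'e', 't', '}', '*', 'T', 'h', 'e', 'n', '*', '{', 'c', 'o', 'l', 'o', 'r', '}'] (pvRep ['w', 'h', 'e', 'n'] ['-', '-', '-', ' ', '{', 'c', 'o', 'l', 'o', 'r', ':', 'o', 'r', 'a', 'n', 'g', 'e', '}', '*', 'W', 'h', 'e', 'n', '*', '{', 'c', 'o', 'l', 'o', 'r', '}'] (pvRep ['g', 'i', 'v', 'e', 'n'] ['-', '-', '-', ' ', '{', 'c', 'o', 'l', 'o', 'r', ':', 'p', 'u', 'r', 'p', 'l', 'e', '}', '*', 'G', 'i', 'v', 'e', 'n', '*', '{', 'c', 'o', 'l', 'o', 'r', '}'] t)))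
                  = pvRep ['"'] [] (pvRep ['t', 'h', 'e', 'n'] ['-', '-', '-', ' ', '{', 'c', 'o', 'l', 'o', 'r', ':', 'v', 'i', 'o', 'l', 'e', 't', '}', '*', 'T', 'h', 'e', 'n', '*', '{', 'c', 'o', 'l', 'o', 'r', '}'] (pvRep ['w', 'h', 'e', 'n'] ['-', '-', '-', ' ', '{', 'c', 'o', 'l', 'o', 'r', ':', 'o', 'r', 'a', 'n', 'g', 'e', '}', '*', 'W', 'h', 'e', 'n', '*', '{', 'c', 'o', 'l', 'o', 'r', '}'] (pvRep ['g', 'i', 'v', 'e', 'n'] ['-', '-', '-', ' ', '{', 'c', 'o', 'l', 'o', 'r', ':', 'p', 'u', 'r', 'p', 'l', 'e', '}', '*', 'G', 'i', 'v', 'e', 'n', '*', '{', 'c', 'o', 'l', 'o', 'r', '}'] t))) := by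
                simp [pvRep, List.isPrefixOf]
              rw [e1, e2, e3, e4]
              have ih' := ih t hrlen
              simp only [litG, litW, litT, litQ, litE, litRG, litRW, litRT] at ih'
              rw [ih']
              have e5 : pvScan ('"' :: t) = pvScan t := by
                simp [pvScan, List.isPrefixOf, litG, litW, litT]
              rw [e5]
            · -- no token starts here: every pass keeps c and moves on
              have hrlen : t.length ≤ n := by simp at h; omega
              have e1 : pvRep ['g', 'i', 'v', 'e', 'n'] ['-', '-', '-', ' ', '{', 'c', 'o', 'l', 'o', 'r', ':', 'p', 'u', 'r', 'p', 'l', 'e', '}', '*', 'G', 'i', 'v', 'e', 'n', '*', '{', 'c', 'o', 'l', 'o', 'r', '}'] (c :: t) = c :: pvRep ['g', 'i', 'v', 'e', 'n'] ['-', '-', '-', ' ', '{', 'c', 'o', 'l', 'o', 'r', ':', 'p', 'u', 'r', 'p', 'l', 'e', '}', '*', 'G', 'i', 'v', 'e', 'n', '*', '{', 'c', 'o', 'l', 'o', 'r', '}'] t := by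
                simp only [pvRep]
                rw [if_neg hG]
              have hWc : ¬ ((['w', 'h', 'e', 'n'] : List Char).isPrefixOf (c :: pvRep ['g', 'i', 'v', 'e', 'n'] ['-', '-', '-', ' ', '{', 'c', 'o', 'l', 'o', 'r', ':', 'p', 'u', 'r', 'p', 'l', 'e', '}', '*', 'G', 'i', 'v', 'e', 'n', '*', '{', 'c', 'o', 'l', 'o', 'r', '}'] t) = true) := by
                intro hx
                have hx' := List.isPrefixOf_iff_prefix.mp hx
                rw [show (['w', 'h', 'e', 'n'] : List Char) = 'w' :: ['h', 'e', 'n'] from rfl,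
                  List.cons_prefix_cons] at hx'
                have hh := (prefix_pvRep 'g' '-' ['i', 'v', 'e', 'n'] _ t.length t
                  ['h', 'e', 'n'] le_rfl (by simp)).mp hx'.2
                exact hW (List.isPrefixOf_iff_prefix.mpr
                  (List.cons_prefix_cons.mpr ⟨hx'.1, hh⟩))
              have e2 : pvRep ['w', 'h', 'e', 'n'] ['-', '-', '-', ' ', '{', 'c', 'o', 'l', 'o', 'r', ':', 'o', 'r', 'a', 'n', 'g', 'e', '}', '*', 'W', 'h', 'e', 'n', '*', '{', 'c', 'o', 'l', 'o', 'r', '}'] (c :: pvRep ['g', 'i', 'v', 'e', 'n'] ['-', '-', '-', ' ', '{', 'c', 'o', 'l', 'o', 'r', ':', 'p', 'u', 'r', 'p', 'l', 'e', '}', '*', 'G', 'i', 'v', 'e', 'n', '*', '{', 'c', 'o', 'l', 'o', 'r', '}'] t)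
                  = c :: pvRep ['w', 'h', 'e', 'n'] ['-', '-', '-', ' ', '{', 'c', 'o', 'l', 'o', 'r', ':', 'o', 'r', 'a', 'n', 'g', 'e', '}', '*', 'W', 'h', 'e', 'n', '*', '{', 'c', 'o', 'l', 'o', 'r', '}'] (pvRep ['g', 'i', 'v', 'e', 'n'] ['-', '-', '-', ' ', '{', 'c', 'o', 'l', 'o', 'r', ':', 'p', 'u', 'r', 'p', 'l', 'e', '}', '*', 'G', 'i', 'v', 'e', 'n', '*', '{', 'c', 'o', 'l', 'o', 'r', '}'] t) := by
                simp only [pvRep]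
                rw [if_neg hWc]
              have hTc : ¬ ((['t', 'h', 'e', 'n'] : List Char).isPrefixOf
                  (c :: pvRep ['w', 'h', 'e', 'n'] ['-', '-', '-', ' ', '{', 'c', 'o', 'l', 'o', 'r', ':', 'o', 'r', 'a', 'n', 'g', 'e', '}', '*', 'W', 'h', 'e', 'n', '*', '{', 'c', 'o', 'l', 'o', 'r', '}'] (pvRep ['g', 'i', 'v', 'e', 'n'] ['-', '-', '-', ' ', '{', 'c', 'o', 'l', 'o', 'r', ':', 'p', 'u', 'r', 'p', 'l', 'e', '}', '*', 'G', 'i', 'v', 'e', 'n', '*', '{', 'c', 'o', 'l', 'o', 'r', '}'] t)) = true) := by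
                intro hx
                have hx' := List.isPrefixOf_iff_prefix.mp hx
                rw [show (['t', 'h', 'e', 'n'] : List Char) = 't' :: ['h', 'e', 'n'] from rfl,
                  List.cons_prefix_cons] at hx'
                have hh1 := (prefix_pvRep 'w' '-' ['h', 'e', 'n'] _
                  (pvRep ['g', 'i', 'v', 'e', 'n'] ['-', '-', '-', ' ', '{', 'c', 'o', 'l', 'o', 'r', ':', 'p', 'u', 'r', 'p', 'l', 'e', '}', '*', 'G', 'i', 'v', 'e', 'n', '*', '{', 'c', 'o', 'l', 'o', 'r', '}'] t).length (pvRep ['g', 'i', 'v', 'e', 'n'] ['-', '-', '-', ' ', '{', 'c', 'o', 'l', 'o', 'r', ':', 'p', 'u', 'r', 'p', 'l', 'e', '}', '*', 'G', 'i', 'v', 'e', 'n', '*', '{', 'c', 'o', 'l', 'o', 'r', '}'] t)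
                  ['h', 'e', 'n'] le_rfl (by simp)).mp hx'.2
                have hh2 := (prefix_pvRep 'g' '-' ['i', 'v', 'e', 'n'] _ t.length t
                  ['h', 'e', 'n'] le_rfl (by simp)).mp hh1
                exact hT (List.isPrefixOf_iff_prefix.mpr
                  (List.cons_prefix_cons.mpr ⟨hx'.1, hh2⟩))
              have e3 : pvRep ['t', 'h', 'e', 'n'] ['-', '-', '-', ' ', '{', 'c', 'o', 'l', 'o', 'r', ':', 'v', 'i', 'o', 'l', 'e', 't', '}', '*', 'T', 'h', 'e', 'n', '*', '{', 'c', 'o', 'l', 'o', 'r', '}'] (c :: pvRep ['w', 'h', 'e', 'n'] ['-', '-', '-', ' ', '{', 'c', 'o', 'l', 'o', 'r', ':', 'o', 'r', 'a', 'n', 'g', 'e', '}', '*', 'W', 'h', 'e', 'n', '*', '{', 'c', 'o', 'l', 'o', 'r', '}'] (pvRep ['g', 'i', 'v', 'e', 'n'] ['-', '-', '-', ' ', '{', 'c', 'o', 'l', 'o', 'r', ':', 'p', 'u', 'r', 'p', 'l', 'e', '}', '*', 'G', 'i', 'v', 'e', 'n', '*', '{', 'c', 'o', 'l', 'o', 'r',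 '}'] t))
                  = c :: pvRep ['t', 'h', 'e', 'n'] ['-', '-', '-', ' ', '{', 'c', 'o', 'l', 'o', 'r', ':', 'v', 'i', 'o', 'l', 'e', 't', '}', '*', 'T', 'h', 'e', 'n', '*', '{', 'c', 'o', 'l', 'o', 'r', '}'] (pvRep ['w', 'h', 'e', 'n'] ['-', '-', '-', ' ', '{', 'c', 'o', 'l', 'o', 'r', ':', 'o', 'r', 'a', 'n', 'g', 'e', '}', '*', 'W', 'h', 'e', 'n', '*', '{', 'c', 'o', 'l', 'o', 'r', '}'] (pvRep ['g', 'i', 'v', 'e', 'n'] ['-', '-', '-', ' ', '{', 'c', 'o', 'l', 'o', 'r', ':', 'p', 'u', 'r', 'p', 'l', 'e', '}', '*', 'G', 'i', 'v', 'e', 'n', '*', '{', 'c', 'o', 'l', 'o', 'r', '}'] t)) := by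
                simp only [pvRep]
                rw [if_neg hTc]
              have hQc : ¬ ((['"'] : List Char).isPrefixOf
                  (c :: pvRep ['t', 'h', 'e', 'n'] ['-', '-', '-', ' ', '{', 'c', 'o', 'l', 'o', 'r', ':', 'v', 'i', 'o', 'l', 'e', 't', '}', '*', 'T', 'h', 'e', 'n', '*', '{', 'c', 'o', 'l', 'o', 'r', '}'] (pvRep ['w', 'h', 'e', 'n'] ['-', '-', '-', ' ', '{', 'c', 'o', 'l', 'o', 'r', ':', 'o', 'r', 'a', 'n', 'g', 'e', '}', '*', 'W', 'h', 'e', 'n', '*', '{', 'c', 'o', 'l', 'o', 'r', '}'] (pvRep ['g', 'i', 'v', 'e', 'n'] ['-', '-', '-', ' ', '{', 'c', 'o', 'l', 'o', 'r', ':', 'p', 'u', 'r', 'p', 'l', 'e', '}', '*', 'G', 'i', 'v', 'e', 'n', '*', '{', 'c', 'o', 'l', 'o', 'r', '}'] t))) = true) := by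
                intro hx
                simp [List.isPrefixOf] at hx
                exact hQ hx.symm
              have e4 : pvRep ['"'] []
                    (c :: pvRep ['t', 'h', 'e', 'n'] ['-', '-', '-', ' ', '{', 'c', 'o', 'l', 'o', 'r', ':', 'v', 'i', 'o', 'l', 'e', 't', '}', '*', 'T', 'h', 'e', 'n', '*', '{', 'c', 'o', 'l', 'o', 'r', '}'] (pvRep ['w', 'h', 'e', 'n'] ['-', '-', '-', ' ', '{', 'c', 'o', 'l', 'o', 'r', ':', 'o', 'r', 'a', 'n', 'g', 'e', '}', '*', 'W', 'h', 'e', 'n', '*', '{', 'c', 'o', 'l', 'o', 'r', '}'] (pvRep ['g', 'i', 'v', 'e', 'n'] ['-', '-', '-', ' ', '{', 'c', 'o', 'l', 'o', 'r', ':', 'p', 'u', 'r', 'p', 'l', 'e', '}', '*', 'G', 'i', 'v', 'e', 'n', '*', '{', 'c', 'o', 'l', 'o', 'r', '}'] t)))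
                  = c :: pvRep ['"'] [] (pvRep ['t', 'h', 'e', 'n'] ['-', '-', '-', ' ', '{', 'c', 'o', 'l', 'o', 'r', ':', 'v', 'i', 'o', 'l', 'e', 't', '}', '*', 'T', 'h', 'e', 'n', '*', '{', 'c', 'o', 'l', 'o', 'r', '}'] (pvRep ['w', 'h', 'e', 'n'] ['-', '-', '-', ' ', '{', 'c', 'o', 'l', 'o', 'r', ':', 'o', 'r', 'a', 'n', 'g', 'e', '}', '*', 'W', 'h', 'e', 'n', '*', '{', 'c', 'o', 'l', 'o', 'r', '}'] (pvRep ['g', 'i', 'v', 'e', 'n'] ['-', '-', '-', ' ', '{', 'c', 'o', 'l', 'o', 'r', ':', 'p', 'u', 'r', 'p', 'l', 'e', '}', '*', 'G', 'i', 'v', 'e', 'n', '*', '{', 'c', 'o', 'l', 'o', 'r', '}'] t))) := by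
                simp only [pvRep]
                rw [if_neg hQc]
              rw [e1, e2, e3, e4]
              have ih' := ih t hrlen
              simp only [litG, litW, litT, litQ, litE, litRG, litRW, litRT] at ih'
              rw [ih']
              have e5 : pvScan (c :: t) = c :: pvScan t := by
                simp only [pvScan, litG, litW, litT, litRG, litRW, litRT]
                rw [if_neg hG, if_neg hW, if_neg hT, if_neg hQ]
              rw [e5]

-- ===== VERDICT (by name: the statement is the Claim_ definition above) =====
theorem format_scenario_step_py_spec : Claim_equal_format_scenario_step_py := by
  intro data _
  unfold Spec_format_scenario_step_py format_scenario_step_py format_scenario_step_py_alt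
  simp only [PySem.Str.replace, String.toList_ofList]
  rw [replace_eq_pvRep _ _ _ (by decide), replace_eq_pvRep _ _ _ (by decide),
     replace_eq_pvRep _ _ _ (by decide), replace_eq_pvRep _ _ _ (by decide)]
  rw [chain_eq_scan _ _ le_rfl]
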